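-- pv_equiv track=rewrite | github.com/Gmonte-alt/SearchQueryCategorizer | sq_frequency_top-5-wordsV000-000-003.py | get_top_quintuplets
-- ===== SOURCE A (Python) =====
-- from collections import defaultdict, Counter
--
-- def get_top_quintuplets(word_to_search_terms, top_cooccurring_words, top_n=1):
--     """Get the top co-occurring quintuplets for each word based on ff_purchases."""
--     top_quintuplets = defaultdict(list)
--
--     for word, top_words in top_cooccurring_words.items():
--         for co_word, _ in top_words:
--             third_level_words = top_cooccurring_words.get(co_word, [])
--             for third_word, _ in third_level_words:
--                 if third_word != word:
--                     fourth_level_words = top_cooccurring_words.get(third_word, [])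
--                     for fourth_word, _ in fourth_level_words:
--                         if fourth_word != co_word and fourth_word != word:
--                             fifth_level_words = top_cooccurring_words.get(fourth_word, [])
--                             for fifth_word, _ in fifth_level_words:
--                                 if fifth_word != third_word and fifth_word != co_word and fifth_word != word:
--                                     # Reaggregate ff_purchases
--                                     total_ff_purchases = 0
--                                     for words_in_search_term, ff_purchases in word_to_search_terms[word]:
--                                         if all(w in words_in_search_term for w in [co_word, third_word, fourth_word, fifth_word]):
--                                             total_ff_purchases += ff_purchases
--                                     if total_ff_purchases > 0:
--                                         top_quintuplets[word].append((co_word, third_word, fourth_word, fifth_word, total_ff_purchases))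
--
--     return top_quintuplets
-- ===== SOURCE B (Python) =====
-- def _word_quints(word, top_words, top_cooccurring_words, total_ff):
--     """All admissible quintuplet chains for `word` with a positive reaggregated total."""
--     return [
--         (co, third, fourth, fifth, total)
--         for co, _ in top_words
--         for third, _ in top_cooccurring_words.get(co, [])
--         if third != word
--         for fourth, _ in top_cooccurring_words.get(third, [])
--         if fourth != co and fourth != word
--         for fifth, _ in top_cooccurring_words.get(fourth, [])
--         if fifth != third and fifth != co and fifth != word
--         for total in (total_ff(co, third, fourth, fifth),)
--         if total > 0
--     ]
--
--
-- def get_top_quintuplets(word_to_search_terms, top_cooccurring_words, top_n=1):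
--     """Get the top co-occurring quintuplets for each word based on ff_purchases."""
--     result = {}
--     for word, top_words in top_cooccurring_words.items():
--         # inverted index over this word's search terms: word -> set of term indices containing it;
--         # built lazily on the first quintuplet that needs it
--         postings = None
--         ffs = None
--         empty = set()
--
--         def total_ff(a, b, c, d, _word=word):
--             nonlocal postings, ffs
--             if postings is None:
--                 terms = word_to_search_terms.get(_word, [])
--                 ffs = [ff for _, ff in terms]
--                 postings = {}
--                 for i, (ws, _) in enumerate(terms):
--                     for w in ws:
--                         postings.setdefault(w, set()).add(i)
--             pb = postings.get(b, empty)
--             pc = postings.get(c, empty)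
--             pd = postings.get(d, empty)
--             return sum(ffs[i] for i in postings.get(a, empty)
--                        if i in pb and i in pc and i in pd)
--
--         quints = _word_quints(word, top_words, top_cooccurring_words, total_ff)
--         if quints:
--             result[word] = quints
--     return result
-- ===== Notes on version B (the rewrite author's own statement) =====
-- stated objective: alternative
-- what changed: B builds, per word and lazily on first use, an inverted index (word -> set of indices of that word's search terms) and reaggregates each candidate quintuplet by intersecting the four posting sets, instead of A's rescan of the whole search-term list (with four list-membership scans per term) for every candidate quintuplet; the result dict is assembled directly instead of via a defaultdict.
import Mathlib
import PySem

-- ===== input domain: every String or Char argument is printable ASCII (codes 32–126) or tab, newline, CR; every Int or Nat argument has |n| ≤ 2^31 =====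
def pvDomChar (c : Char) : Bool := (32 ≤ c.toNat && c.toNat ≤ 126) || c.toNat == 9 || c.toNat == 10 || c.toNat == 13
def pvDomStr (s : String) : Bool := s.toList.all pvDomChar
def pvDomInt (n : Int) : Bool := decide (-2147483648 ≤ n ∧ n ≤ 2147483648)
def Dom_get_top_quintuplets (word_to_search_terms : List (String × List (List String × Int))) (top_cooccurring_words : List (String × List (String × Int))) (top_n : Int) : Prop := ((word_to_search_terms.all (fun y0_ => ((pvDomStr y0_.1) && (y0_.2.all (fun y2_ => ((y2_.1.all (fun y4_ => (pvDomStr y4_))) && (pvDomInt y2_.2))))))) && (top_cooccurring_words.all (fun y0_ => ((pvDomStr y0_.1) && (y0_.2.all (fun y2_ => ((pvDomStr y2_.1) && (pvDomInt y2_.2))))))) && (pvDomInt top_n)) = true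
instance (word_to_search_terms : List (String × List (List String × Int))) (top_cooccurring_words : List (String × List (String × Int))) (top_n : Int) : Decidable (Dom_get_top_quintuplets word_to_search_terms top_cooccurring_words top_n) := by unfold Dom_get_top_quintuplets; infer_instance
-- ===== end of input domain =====

-- B replaces A's per-quintuplet rescan of all of the word's search terms by a per-word inverted index
-- (word -> set of search-term indices) whose posting sets are intersected; equivalence is about return values
-- (A returns a defaultdict, rendered as its item list).

-- ===== PORT A =====
-- dict.get(k, []) on the association list (first match)
def pvLookupT (tcw : List (String × List (String × Int))) (k : String) : List (String × Int) :=
  (List.lookup k tcw).getD []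

-- word_to_search_terms[word]; Pre_ guarantees the key is present whenever this is evaluated,
-- so the [] default is never observed on admitted inputs (missing key = KeyError, excluded by Pre_)
def pvLookupW (wts : List (String × List (List String × Int))) (k : String) : List (List String × Int) :=
  (List.lookup k wts).getD []

-- the inner "reaggregate ff_purchases" scan of A
def pvScanA (terms : List (List String × Int)) (co third fourth fifth : String) : Int :=
  terms.foldl (fun total p =>
    if [co, third, fourth, fifth].all (fun w => p.1.contains w) then total + p.2 else total) 0

def get_top_quintuplets (word_to_search_terms : List (String × List (List String × Int))) (top_cooccurring_words : List (String × List (String × Int))) (top_n : Int) : List (String × List (String × String × String × String × Int)) :=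
  (top_cooccurring_words.foldl
    (fun (d : PySem.Dict String (List (String × String × String × String × Int))) wp =>
      wp.2.foldl (fun d cp =>
        (pvLookupT top_cooccurring_words cp.1).foldl (fun d tp =>
          if tp.1 ≠ wp.1 then
            (pvLookupT top_cooccurring_words tp.1).foldl (fun d fp =>
              if fp.1 ≠ cp.1 ∧ fp.1 ≠ wp.1 then
                (pvLookupT top_cooccurring_words fp.1).foldl (fun d gp =>
                  if gp.1 ≠ tp.1 ∧ gp.1 ≠ cp.1 ∧ gp.1 ≠ wp.1 then
                    let total := pvScanA (pvLookupW word_to_search_terms wp.1) cp.1 tp.1 fp.1 gp.1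
                    if total > 0 then
                      d.modify wp.1 [] (fun l => l ++ [(cp.1, tp.1, fp.1, gp.1, total)])
                    else d
                  else d) d
              else d) d
          else d) d) d)
    PySem.Dict.empty).items

-- ===== PORT B =====
-- inverted index: word -> set of indices of the search terms containing it
def pvPostings (terms : List (List String × Int)) : PySem.Dict String (PySem.Set Int) :=
  (PySem.List.enumerate terms).foldl
    (fun d ip => ip.2.1.foldl
      (fun d w => d.insert w (PySem.Set.add (d.getD w PySem.Set.empty) ip.1)) d)
    PySem.Dict.empty

-- total_ff: sum ffs[i] over the intersection of the four posting sets (indices are always in range,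
-- so pyGetD's default is never used; the sum over a set is order-independent)
def pvTotalB (postings : PySem.Dict String (PySem.Set Int)) (ffs : List Int)
    (a b c d : String) : Int :=
  (((postings.getD a PySem.Set.empty).filter (fun i =>
      (postings.getD b PySem.Set.empty).contains i &&
      (postings.getD c PySem.Set.empty).contains i &&
      (postings.getD d PySem.Set.empty).contains i)).map
    (fun i => PySem.List.pyGetD ffs i 0)).sum

-- _word_quints: the chain comprehension ('for total in (total_ff(...),)' is a let binding)
def pvQuints (total : String → String → String → String → Int) (word : String)
    (tw : List (String × Int)) (tcw : List (String × List (String × Int))) :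
    List (String × String × String × String × Int) :=
  tw.flatMap (fun cp =>
    ((List.lookup cp.1 tcw).getD []).flatMap (fun tp : String × Int =>
      if tp.1 ≠ word then
        ((List.lookup tp.1 tcw).getD []).flatMap (fun fp =>
          if fp.1 ≠ cp.1 ∧ fp.1 ≠ word then
            ((List.lookup fp.1 tcw).getD []).flatMap (fun gp =>
              if gp.1 ≠ tp.1 ∧ gp.1 ≠ cp.1 ∧ gp.1 ≠ word then
                let t := total cp.1 tp.1 fp.1 gp.1
                if t > 0 then [(cp.1, tp.1, fp.1, gp.1, t)] else []
              else [])
          else [])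
      else []))

def get_top_quintuplets_alt (word_to_search_terms : List (String × List (List String × Int))) (top_cooccurring_words : List (String × List (String × Int))) (top_n : Int) : List (String × List (String × String × String × String × Int)) :=
  top_cooccurring_words.foldl
    (fun acc wp =>
      let terms := (List.lookup wp.1 word_to_search_terms).getD []
      let ffs := terms.map (·.2)
      let postings := pvPostings terms
      let quints := pvQuints (fun a b c d => pvTotalB postings ffs a b c d) wp.1 wp.2
        top_cooccurring_words
      if quints = [] then acc else acc ++ [(wp.1, quints)])
    []

-- ===== PRECONDITION & SPEC =====
-- a depth-5 chain from `word` through the co-occurrence lists (exactly the condition under which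
-- A evaluates word_to_search_terms[word])
def pvChain5 (tcw : List (String × List (String × Int))) (word : String)
    (tw : List (String × Int)) : Bool :=
  tw.any (fun cp : String × Int => ((List.lookup cp.1 tcw).getD []).any (fun tp => tp.1 != word &&
    ((List.lookup tp.1 tcw).getD []).any (fun fp => fp.1 != cp.1 && fp.1 != word &&
      ((List.lookup fp.1 tcw).getD []).any (fun gp =>
        gp.1 != tp.1 && gp.1 != cp.1 && gp.1 != word))))

-- Pre_ excludes (a) association lists whose top_cooccurring_words keys repeat — those do not represent a
-- Python dict — and (b) inputs where some word of top_cooccurring_words admits a depth-5 chain but is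
-- missing from word_to_search_terms: exactly there A raises KeyError.
def Pre_get_top_quintuplets (word_to_search_terms : List (String × List (List String × Int))) (top_cooccurring_words : List (String × List (String × Int))) (top_n : Int) : Prop :=
  (top_cooccurring_words.map Prod.fst).Nodup ∧
  ∀ wp ∈ top_cooccurring_words, pvChain5 top_cooccurring_words wp.1 wp.2 = true →
    wp.1 ∈ word_to_search_terms.map Prod.fst

instance (word_to_search_terms : List (String × List (List String × Int))) (top_cooccurring_words : List (String × List (String × Int))) (top_n : Int) : Decidable (Pre_get_top_quintuplets word_to_search_terms top_cooccurring_words top_n) := by unfold Pre_get_top_quintuplets; infer_instance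

def pvWitness_get_top_quintuplets : (List (String × List (List String × Int))) × (List (String × List (String × Int))) × Int :=
  ([("a", [(["a", "b"], 3)])], [("a", [("b", 1)]), ("b", [("a", 2)])], 1)

def Spec_get_top_quintuplets (word_to_search_terms : List (String × List (List String × Int))) (top_cooccurring_words : List (String × List (String × Int))) (top_n : Int) (out : List (String × List (String × String × String × String × Int))) : Prop := out = get_top_quintuplets_alt word_to_search_terms top_cooccurring_words top_n
instance (word_to_search_terms : List (String × List (List String × Int))) (top_cooccurring_words : List (String × List (String × Int))) (top_n : Int) (out : List (String × List (String × String × String × String × Int))) : Decidable (Spec_get_top_quintuplets word_to_search_terms top_cooccurring_words top_n out) := by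
  unfold Spec_get_top_quintuplets
  have hp : DecidableEq (String × List (String × String × String × String × Int)) := instDecidableEqProd
  exact @instDecidableEqList _ hp _ _

-- ===== CLAIM (what is proved, stated in full; the proofs are below) =====
def Claim_equal_get_top_quintuplets : Prop := ∀ (word_to_search_terms : List (String × List (List String × Int))) (top_cooccurring_words : List (String × List (String × Int))) (top_n : Int), Dom_get_top_quintuplets word_to_search_terms top_cooccurring_words top_n → Pre_get_top_quintuplets word_to_search_terms top_cooccurring_words top_n → Spec_get_top_quintuplets word_to_search_terms top_cooccurring_words top_n (get_top_quintuplets word_to_search_terms top_cooccurring_words top_n)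

-- ===== LEMMAS AND PROOFS =====

-- the index list that postings[w] materialises: indices (from i0) of the terms containing w, in order
def pvIdxL (terms : List (List String × Int)) (w : String) (i0 : Int) : List Int :=
  match terms with
  | [] => []
  | p :: rest => (if p.1.contains w then [i0] else []) ++ pvIdxL rest w (i0 + 1)

lemma pvIdxL_bounds (w : String) : ∀ (terms : List (List String × Int)) (i0 j : Int),
    j ∈ pvIdxL terms w i0 → i0 ≤ j ∧ j < i0 + terms.length := by
  intro terms
  induction terms with
  | nil => intro i0 j h; simp [pvIdxL] at h
  | cons p rest ih =>
    intro i0 j h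
    simp only [pvIdxL, List.mem_append] at h
    rcases h with h | h
    · split at h
      · simp only [List.mem_singleton] at h
        subst h
        simp only [List.length_cons]
        push_cast
        omega
      · simp at h
    · have := ih (i0 + 1) j h
      simp only [List.length_cons]
      push_cast at this ⊢
      omega

lemma pvIdxL_append (w : String) (x : List String × Int) :
    ∀ (ts : List (List String × Int)) (i0 : Int),
    pvIdxL (ts ++ [x]) w i0 = pvIdxL ts w i0 ++ (if x.1.contains w then [i0 + ts.length] else []) := by
  intro ts
  induction ts with
  | nil => intro i0; simp [pvIdxL]
  | cons p rest ih =>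
    intro i0
    simp only [List.cons_append, pvIdxL, ih (i0 + 1), List.length_cons, List.append_assoc]
    congr 2
    push_cast; ring_nf

-- one search term: processing its word list at index i adds i to the posting set of each of its words
lemma pvInner_getD (i : Int) : ∀ (ws : List String) (d : PySem.Dict String (PySem.Set Int)) (w' : String),
    ((ws.foldl (fun d u => d.insert u (PySem.Set.add (d.getD u PySem.Set.empty) i)) d).getD w' PySem.Set.empty)
      = if w' ∈ ws ∧ i ∉ d.getD w' PySem.Set.empty
        then d.getD w' PySem.Set.empty ++ [i] else d.getD w' PySem.Set.empty := by
  intro ws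
  induction ws with
  | nil => intro d w'; simp
  | cons u t ih =>
    intro d w'
    simp only [List.foldl_cons]
    rw [ih]
    by_cases hw : w' = u
    · subst hw
      rw [PySem.Dict.getD_insert_self]
      have hset : ∀ s : PySem.Set Int, i ∈ PySem.Set.add s i := by
        intro s
        unfold PySem.Set.add
        split
        · rename_i h; simpa [List.contains_eq_mem] using h
        · simp
      have hni : ¬ (w' ∈ t ∧ i ∉ PySem.Set.add (d.getD w' PySem.Set.empty) i) :=
        fun h => h.2 (hset _)
      rw [if_neg hni]
      by_cases hc : i ∈ d.getD w' PySem.Set.empty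
      · have ha : PySem.Set.add (d.getD w' PySem.Set.empty) i = d.getD w' PySem.Set.empty := by
          unfold PySem.Set.add
          rw [if_pos (by simpa [List.contains_eq_mem] using hc)]
        have hni2 : ¬ (w' ∈ w' :: t ∧ i ∉ d.getD w' PySem.Set.empty) := fun h => h.2 hc
        rw [ha, if_neg hni2]
      · have ha : PySem.Set.add (d.getD w' PySem.Set.empty) i
            = d.getD w' PySem.Set.empty ++ [i] := by
          unfold PySem.Set.add
          rw [if_neg (by simpa [List.contains_eq_mem] using hc)]
        have hpi : w' ∈ w' :: t ∧ i ∉ d.getD w' PySem.Set.empty := ⟨List.mem_cons_self .., hc⟩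
        rw [ha, if_pos hpi]
    · rw [PySem.Dict.getD_insert, if_neg hw]
      simp [List.mem_cons, hw]

lemma pvPost_char (w : String) : ∀ (terms : List (List String × Int)) (i0 : Int)
    (d : PySem.Dict String (PySem.Set Int)),
    (∀ w' j, j ∈ d.getD w' PySem.Set.empty → j < i0) →
    (((PySem.List.enumerate terms i0).foldl
        (fun d ip => ip.2.1.foldl
          (fun d w => d.insert w (PySem.Set.add (d.getD w PySem.Set.empty) ip.1)) d) d).getD w PySem.Set.empty)
      = d.getD w PySem.Set.empty ++ pvIdxL terms w i0 := by
  intro terms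
  induction terms with
  | nil =>
    intro i0 d _
    simp only [show PySem.List.enumerate ([] : List (List String × Int)) i0 = [] from rfl,
      show pvIdxL [] w i0 = [] from rfl, List.foldl_nil, List.append_nil]
  | cons p rest ih =>
    intro i0 d hb
    have hstep : ∀ w', ((p.1.foldl
        (fun d u => d.insert u (PySem.Set.add (d.getD u PySem.Set.empty) i0)) d).getD w' PySem.Set.empty)
        = d.getD w' PySem.Set.empty ++ (if p.1.contains w' then [i0] else []) := by
      intro w'
      rw [pvInner_getD]
      have hnc : i0 ∉ d.getD w' PySem.Set.empty := fun hm => absurd (hb w' i0 hm) (lt_irrefl i0)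
      by_cases hm : w' ∈ p.1
      · rw [if_pos ⟨hm, hnc⟩, if_pos (by simpa [List.contains_eq_mem] using hm)]
      · rw [if_neg (fun h => hm h.1), if_neg (by simpa [List.contains_eq_mem] using hm),
          List.append_nil]
    simp only [show PySem.List.enumerate (p :: rest) i0
        = (i0, p) :: PySem.List.enumerate rest (i0 + 1) from rfl, List.foldl_cons]
    rw [ih (i0 + 1) _ ?_]
    · rw [hstep w]
      simp [pvIdxL, List.append_assoc]
    · intro w' j hj
      rw [hstep w'] at hj
      simp only [List.mem_append] at hj
      rcases hj with hj | hj
      · have := hb w' j hj; omega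
      · split at hj
        · simp only [List.mem_singleton] at hj; omega
        · simp at hj

lemma pvPostings_getD (terms : List (List String × Int)) (w : String) :
    (pvPostings terms).getD w PySem.Set.empty = pvIdxL terms w 0 := by
  unfold pvPostings
  rw [pvPost_char w terms 0 PySem.Dict.empty (by intro w' j hj; simp at hj)]
  simp

-- membership at an index below the bound is unaffected by extending the term list
lemma pvIdxL_contains_lt (w : String) (ts : List (List String × Int)) (x : List String × Int)
    (j : Int) (hj : j < ts.length) :
    (pvIdxL (ts ++ [x]) w 0).contains j = (pvIdxL ts w 0).contains j := by
  rw [pvIdxL_append]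
  simp only [List.contains_append]
  have hb : (if x.1.contains w = true then [(0 : Int) + ts.length] else []).contains j = false := by
    split
    · simp only [List.contains_eq_mem, List.mem_singleton, decide_eq_false_iff_not]
      omega
    · simp
  rw [hb, Bool.or_false]

lemma pvIdxL_contains_self (w : String) (ts : List (List String × Int)) (x : List String × Int) :
    (pvIdxL (ts ++ [x]) w 0).contains (ts.length : Int) = x.1.contains w := by
  rw [pvIdxL_append]
  simp only [List.contains_append]
  have h1 : (pvIdxL ts w 0).contains (ts.length : Int) = false := by
    simp only [List.contains_eq_mem, decide_eq_false_iff_not]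
    intro hm
    have := pvIdxL_bounds w ts 0 _ hm
    omega
  rw [h1, Bool.false_or]
  by_cases hx : x.1.contains w = true
  · rw [if_pos hx, hx]
    simp only [List.contains_eq_mem, List.mem_singleton, decide_eq_true_eq]
    omega
  · have hx' : x.1.contains w = false := by simpa using hx
    rw [if_neg hx, hx']
    simp

-- THE CORE: the posting-set intersection sum equals A's rescan of the term list
lemma pvTotal_eq_scan (terms : List (List String × Int)) (a b c d : String) :
    pvTotalB (pvPostings terms) (terms.map (·.2)) a b c d = pvScanA terms a b c d := by
  unfold pvTotalB
  simp only [PySem.Set.contains, pvPostings_getD]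
  induction terms using List.reverseRecOn with
  | nil => simp [pvIdxL, pvScanA]
  | append_singleton ts x ih =>
    have hca : ∀ w (j : Int), j ∈ pvIdxL ts w 0 → 0 ≤ j ∧ j < (ts.length : Int) := by
      intro w j hj
      have := pvIdxL_bounds w ts 0 j hj
      omega
    have hpred : ∀ j ∈ pvIdxL ts a 0,
        ((pvIdxL (ts ++ [x]) b 0).contains j && (pvIdxL (ts ++ [x]) c 0).contains j &&
          (pvIdxL (ts ++ [x]) d 0).contains j)
        = ((pvIdxL ts b 0).contains j && (pvIdxL ts c 0).contains j &&
          (pvIdxL ts d 0).contains j) := by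
      intro j hj
      have hlt : j < (ts.length : Int) := (hca a j hj).2
      rw [pvIdxL_contains_lt b ts x j hlt, pvIdxL_contains_lt c ts x j hlt,
        pvIdxL_contains_lt d ts x j hlt]
    have hmap : ∀ j ∈ (pvIdxL ts a 0).filter (fun i =>
        (pvIdxL ts b 0).contains i && (pvIdxL ts c 0).contains i && (pvIdxL ts d 0).contains i),
        PySem.List.pyGetD ((ts ++ [x]).map (fun p => p.2)) j 0
          = PySem.List.pyGetD (ts.map (fun p => p.2)) j 0 := by
      intro j hj
      have hj' := List.mem_of_mem_filter hj
      obtain ⟨h0, hlt⟩ := hca a j hj'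
      rw [PySem.List.pyGetD_eq_getElem _ _ h0 (by simp; omega),
        PySem.List.pyGetD_eq_getElem _ _ h0 (by simp; omega)]
      simp only [List.map_append, List.getElem_append, List.length_map]
      rw [dif_pos (by omega)]
    have hnew : ((List.map (fun i => PySem.List.pyGetD ((ts ++ [x]).map (fun p => p.2)) i 0)
        (List.filter (fun i =>
          (pvIdxL (ts ++ [x]) b 0).contains i && (pvIdxL (ts ++ [x]) c 0).contains i &&
            (pvIdxL (ts ++ [x]) d 0).contains i)
          (if x.1.contains a = true then [(ts.length : Int)] else []))).sum)
        = if x.1.contains a && x.1.contains b && x.1.contains c && x.1.contains d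
          then x.2 else 0 := by
      by_cases ha : x.1.contains a = true
      · rw [if_pos ha]
        simp only [List.filter_cons, List.filter_nil]
        rw [pvIdxL_contains_self b, pvIdxL_contains_self c, pvIdxL_contains_self d]
        by_cases hbcd : (x.1.contains b && x.1.contains c && x.1.contains d) = true
        · rw [if_pos hbcd]
          simp only [List.map_cons, List.map_nil, List.sum_cons, List.sum_nil, add_zero]
          rw [PySem.List.pyGetD_natCast, List.map_append, List.getD_eq_getElem?_getD,
            List.getElem?_append_right (by simp)]
          simp only [List.length_map, Nat.sub_self, List.map_cons, List.map_nil,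
            List.getElem?_cons_zero, Option.getD_some]
          simp only [ha, Bool.true_and]
          rw [if_pos hbcd]
        · rw [if_neg hbcd]
          simp only [List.map_nil, List.sum_nil]
          have hfull : (x.1.contains a && x.1.contains b && x.1.contains c &&
              x.1.contains d) = false := by
            cases hb : x.1.contains b <;> cases hc : x.1.contains c <;>
              cases hd : x.1.contains d <;> simp_all
          rw [if_neg (by rw [hfull]; exact Bool.false_ne_true)]
      · have ha' : x.1.contains a = false := by simpa using ha
        rw [if_neg ha]
        simp only [List.filter_nil, List.map_nil, List.sum_nil]
        have hfull2 : (x.1.contains a && x.1.contains b && x.1.contains c &&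
            x.1.contains d) = false := by
          rw [ha', Bool.false_and, Bool.false_and, Bool.false_and]
        rw [if_neg (by rw [hfull2]; exact Bool.false_ne_true)]
    rw [pvIdxL_append a x ts 0, List.filter_append, List.filter_congr hpred, List.map_append,
      List.sum_append, List.map_congr_left hmap, ih]
    rw [show (0 : Int) + ts.length = (ts.length : Int) by omega] at *
    rw [hnew]
    unfold pvScanA
    rw [List.foldl_append]
    simp only [List.foldl_cons, List.foldl_nil, List.all_cons, List.all_nil, Bool.and_true]
    by_cases h : (x.1.contains a && x.1.contains b && x.1.contains c && x.1.contains d) = true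
    · rw [if_pos h, if_pos (by simp only [Bool.and_eq_true] at h ⊢; tauto)]
    · rw [if_neg h, if_neg (fun hh => h (by simp only [Bool.and_eq_true] at hh ⊢; tauto)),
        add_zero]

-- a fold appending quintuplets into the dict at a fixed key equals the fold of the flattened list
lemma pvFold_to_flat {α : Type} (w : String)
    (F : PySem.Dict String (List (String × String × String × String × Int)) → α →
      PySem.Dict String (List (String × String × String × String × Int)))
    (G : α → List (String × String × String × String × Int)) (l : List α)
    (h : ∀ d x, x ∈ l → F d x = (G x).foldl (fun d q => d.modify w [] (fun v => v ++ [q])) d) :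
    ∀ d, l.foldl F d = (l.flatMap G).foldl (fun d q => d.modify w [] (fun v => v ++ [q])) d := by
  induction l with
  | nil => intro d; simp
  | cons x t ih =>
    intro d
    simp only [List.foldl_cons, List.flatMap_cons, List.foldl_append]
    rw [h d x (List.mem_cons_self ..)]
    exact ih (fun d y hy => h d y (List.mem_cons_of_mem _ hy)) _

-- A's nested per-word loops are the quintuplet list folded into the dict at key `word`
lemma pvA_word (wts : List (String × List (List String × Int)))
    (tcw : List (String × List (String × Int))) (wp : String × List (String × Int))
    (d : PySem.Dict String (List (String × String × String × String × Int))) :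
    (wp.2.foldl (fun d cp =>
        (pvLookupT tcw cp.1).foldl (fun d tp =>
          if tp.1 ≠ wp.1 then
            (pvLookupT tcw tp.1).foldl (fun d fp =>
              if fp.1 ≠ cp.1 ∧ fp.1 ≠ wp.1 then
                (pvLookupT tcw fp.1).foldl (fun d gp =>
                  if gp.1 ≠ tp.1 ∧ gp.1 ≠ cp.1 ∧ gp.1 ≠ wp.1 then
                    let total := pvScanA (pvLookupW wts wp.1) cp.1 tp.1 fp.1 gp.1
                    if total > 0 then
                      d.modify wp.1 [] (fun l => l ++ [(cp.1, tp.1, fp.1, gp.1, total)])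
                    else d
                  else d) d
              else d) d
          else d) d) d)
    = (pvQuints (fun a b c e => pvScanA (pvLookupW wts wp.1) a b c e) wp.1 wp.2 tcw).foldl
        (fun d q => d.modify wp.1 [] (fun v => v ++ [q])) d := by
  unfold pvQuints
  refine pvFold_to_flat wp.1 _
    (fun cp : String × Int => ((List.lookup cp.1 tcw).getD []).flatMap (fun tp : String × Int =>
      if tp.1 ≠ wp.1 then
        ((List.lookup tp.1 tcw).getD []).flatMap (fun fp =>
          if fp.1 ≠ cp.1 ∧ fp.1 ≠ wp.1 then
            ((List.lookup fp.1 tcw).getD []).flatMap (fun gp =>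
              if gp.1 ≠ tp.1 ∧ gp.1 ≠ cp.1 ∧ gp.1 ≠ wp.1 then
                let t := pvScanA (pvLookupW wts wp.1) cp.1 tp.1 fp.1 gp.1
                if t > 0 then [(cp.1, tp.1, fp.1, gp.1, t)] else []
              else [])
          else [])
      else []))
    wp.2 (fun d cp _ => ?_) d
  simp only [pvLookupT]
  refine pvFold_to_flat wp.1 _
    (fun tp : String × Int =>
      if tp.1 ≠ wp.1 then
        ((List.lookup tp.1 tcw).getD []).flatMap (fun fp =>
          if fp.1 ≠ cp.1 ∧ fp.1 ≠ wp.1 then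
            ((List.lookup fp.1 tcw).getD []).flatMap (fun gp =>
              if gp.1 ≠ tp.1 ∧ gp.1 ≠ cp.1 ∧ gp.1 ≠ wp.1 then
                let t := pvScanA (pvLookupW wts wp.1) cp.1 tp.1 fp.1 gp.1
                if t > 0 then [(cp.1, tp.1, fp.1, gp.1, t)] else []
              else [])
          else [])
      else [])
    _ (fun d tp _ => ?_) d
  by_cases h1 : tp.1 ≠ wp.1
  · simp only [if_pos h1]
    refine pvFold_to_flat wp.1 _
      (fun fp : String × Int =>
        if fp.1 ≠ cp.1 ∧ fp.1 ≠ wp.1 then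
          ((List.lookup fp.1 tcw).getD []).flatMap (fun gp =>
            if gp.1 ≠ tp.1 ∧ gp.1 ≠ cp.1 ∧ gp.1 ≠ wp.1 then
              let t := pvScanA (pvLookupW wts wp.1) cp.1 tp.1 fp.1 gp.1
              if t > 0 then [(cp.1, tp.1, fp.1, gp.1, t)] else []
            else [])
        else [])
      _ (fun d fp _ => ?_) d
    by_cases h2 : fp.1 ≠ cp.1 ∧ fp.1 ≠ wp.1
    · simp only [if_pos h2]
      refine pvFold_to_flat wp.1 _
        (fun gp : String × Int =>
          if gp.1 ≠ tp.1 ∧ gp.1 ≠ cp.1 ∧ gp.1 ≠ wp.1 then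
            let t := pvScanA (pvLookupW wts wp.1) cp.1 tp.1 fp.1 gp.1
            if t > 0 then [(cp.1, tp.1, fp.1, gp.1, t)] else []
          else [])
        _ (fun d gp _ => ?_) d
      by_cases h3 : gp.1 ≠ tp.1 ∧ gp.1 ≠ cp.1 ∧ gp.1 ≠ wp.1
      · simp only [if_pos h3]
        by_cases ht : pvScanA (pvLookupW wts wp.1) cp.1 tp.1 fp.1 gp.1 > 0 <;> simp [ht]
      · simp [if_neg h3]
    · simp [if_neg h2]
  · simp [if_neg h1]

lemma pvFold_modify (w : String) :
    ∀ (qs : List (String × String × String × String × Int))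
      (d : PySem.Dict String (List (String × String × String × String × Int))),
    qs.foldl (fun d q => d.modify w [] (fun v => v ++ [q])) d
      = if qs = [] then d else d.modify w [] (fun v => v ++ qs) := by
  intro qs
  induction qs with
  | nil => intro d; simp
  | cons q t ih =>
    intro d
    simp only [List.foldl_cons, ih]
    by_cases ht : t = []
    · subst ht; simp
    · rw [if_neg ht, if_neg (by simp)]
      unfold PySem.Dict.modify
      rw [PySem.Dict.insert_insert_self, PySem.Dict.getD_insert_self]
      simp

-- top-level: folding A's per-word step over words with fresh distinct keys appends B's pairs
lemma pvMain (wts : List (String × List (List String × Int)))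
    (tcw : List (String × List (String × Int))) :
    ∀ (l : List (String × List (String × Int)))
      (d : PySem.Dict String (List (String × String × String × String × Int)))
      (acc : List (String × List (String × String × String × String × Int))),
    (l.map Prod.fst).Nodup → (∀ wp ∈ l, d.contains wp.1 = false) → d.items = acc →
    ((l.foldl (fun d wp =>
        wp.2.foldl (fun d cp =>
          (pvLookupT tcw cp.1).foldl (fun d tp =>
            if tp.1 ≠ wp.1 then
              (pvLookupT tcw tp.1).foldl (fun d fp =>
                if fp.1 ≠ cp.1 ∧ fp.1 ≠ wp.1 then
                  (pvLookupT tcw fp.1).foldl (fun d gp =>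
                    if gp.1 ≠ tp.1 ∧ gp.1 ≠ cp.1 ∧ gp.1 ≠ wp.1 then
                      let total := pvScanA (pvLookupW wts wp.1) cp.1 tp.1 fp.1 gp.1
                      if total > 0 then
                        d.modify wp.1 [] (fun l => l ++ [(cp.1, tp.1, fp.1, gp.1, total)])
                      else d
                    else d) d
                else d) d
            else d) d) d) d).items)
      = l.foldl (fun acc wp =>
          let terms := (List.lookup wp.1 wts).getD []
          let ffs := terms.map (·.2)
          let postings := pvPostings terms
          let quints := pvQuints (fun a b c d => pvTotalB postings ffs a b c d) wp.1 wp.2 tcw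
          if quints = [] then acc else acc ++ [(wp.1, quints)]) acc := by
  intro l
  induction l with
  | nil => intro d acc _ _ hitems; simpa using hitems
  | cons wp t ih =>
    intro d acc hnd hfresh hitems
    simp only [List.foldl_cons]
    have hq : pvQuints (fun a b c e => pvScanA (pvLookupW wts wp.1) a b c e) wp.1 wp.2 tcw
        = pvQuints (fun a b c e => pvTotalB (pvPostings ((List.lookup wp.1 wts).getD []))
            (((List.lookup wp.1 wts).getD []).map (·.2)) a b c e) wp.1 wp.2 tcw := by
      congr 1
      funext a b c e
      rw [pvTotal_eq_scan]
      rfl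
    rw [pvA_word wts tcw wp d, pvFold_modify, hq]
    set Q := pvQuints (fun a b c e => pvTotalB (pvPostings ((List.lookup wp.1 wts).getD []))
      (((List.lookup wp.1 wts).getD []).map (·.2)) a b c e) wp.1 wp.2 tcw with hQ
    have hwpfresh : d.contains wp.1 = false := hfresh wp List.mem_cons_self
    have hnd' : (t.map Prod.fst).Nodup := by
      simpa using hnd.of_cons
    by_cases hQe : Q = []
    · rw [if_pos hQe]
      refine ih d acc hnd' (fun wq hq' => hfresh wq (List.mem_cons_of_mem _ hq')) hitems
        |>.trans ?_
      simp [hQe]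
    · rw [if_neg hQe]
      have hmod : d.modify wp.1 [] (fun v => v ++ Q) = d.insert wp.1 Q := by
        unfold PySem.Dict.modify
        have hg : d.getD wp.1 ([] : List (String × String × String × String × Int)) = [] :=
          PySem.Dict.getD_of_not_contains d [] hwpfresh
        simp only [hg, List.nil_append]
      rw [hmod]
      have hfresh' : ∀ wq ∈ t, (d.insert wp.1 Q).contains wq.1 = false := by
        intro wq hq'
        rw [PySem.Dict.contains_insert]
        have hne : wq.1 ≠ wp.1 := by
          intro he
          simp only [List.map_cons, List.nodup_cons] at hnd
          exact hnd.1 (he ▸ List.mem_map_of_mem hq')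
        simp [hne, hfresh wq (List.mem_cons_of_mem _ hq')]
      refine (ih (d.insert wp.1 Q) (acc ++ [(wp.1, Q)]) hnd' hfresh' ?_).trans ?_
      · rw [PySem.Dict.items_insert_of_not_contains _ _ hwpfresh, hitems]
      · rw [if_neg hQe]

-- ===== VERDICT (by name: the statement is the Claim_ definition above) =====
theorem get_top_quintuplets_spec : Claim_equal_get_top_quintuplets := by
  unfold Claim_equal_get_top_quintuplets
  intro wts tcw top_n _ hpre
  unfold Spec_get_top_quintuplets get_top_quintuplets get_top_quintuplets_alt
  exact pvMain wts tcw tcw PySem.Dict.empty [] hpre.1 (fun wp _ => rfl) rfl
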